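-- pv_equiv track=rewrite | github.com/multimodal-art-projection/MAP-NEO | Matrix/chinese_data_clean_pipeline/filter/filter.py | count_ngram_duplicates
-- ===== SOURCE A (Python) =====
-- def count_ngram_duplicates(text, n):
--     # Count duplicate ngrams
--     ngram_counts = {}
--     # Count n-grams and their occurences
--     for i in range(len(text) - n + 1):
--         ngram = text[i:i + n]
--         ngram_counts[ngram] = ngram_counts.get(ngram, 0) + 1
--     # Sort n-grams in descending order of occurrences
--     sorted_ngrams = sorted(ngram_counts.items(), key=lambda x: x[1], reverse=True)
--     # For n [2,4], we calculate the proportion of characters contained in the n-gram with the highest number of occurrences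
--     if sorted_ngrams and sorted_ngrams[0]:
--         if n <= 4:
--             # Only tackle with n-gram with the highest number of occurrences
--             ngram = sorted_ngrams[0][0]
--             ngram_counts[ngram] -= 1  # Avoid counting the number of repetitions with the n-gram itself
--             return ngram_counts[ngram] * len(ngram)
--         # For n in [5,10], we compute the proportion of characters contained in all duplicate n-grams
--         else:
--             duplicate_ngrams = set()  # Store all duplicate n-grams
--             overlapping_characters = set()  # Store characters in duplicate n-grams
--             for ngram, count in sorted_ngrams:
--                 if count > 1:
--                     duplicate_ngrams.add(ngram)
--                     overlapping_characters.update(set(ngram))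
--             return len(overlapping_characters)
--     return 0
-- ===== SOURCE B (Python) =====
-- def count_ngram_duplicates(text, n):
--     if n <= 0 or n > len(text):
--         return 0
--     grams = sorted(text[i:i + n] for i in range(len(text) - n + 1))
--     if n <= 4:
--         best = run = 1
--         for a, b in zip(grams, grams[1:]):
--             run = run + 1 if a == b else 1
--             if run > best:
--                 best = run
--         return (best - 1) * n
--     chars = set()
--     for a, b in zip(grams, grams[1:]):
--         if a == b:
--             chars.update(a)
--     return len(chars)
-- ===== Notes on version B (the rewrite author's own statement) =====
-- stated objective: alternative
-- what changed: B drops A's ngram-count dictionary and its sort of (ngram,count) pairs by frequency; instead it sorts the flat ngram list once and scans adjacent-equal pairs: the maximum adjacent-equal run gives (max_count-1)*n for n<=4, and for n>4 the characters of every ngram with an equal neighbour form the duplicate-character set.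
import Mathlib
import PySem

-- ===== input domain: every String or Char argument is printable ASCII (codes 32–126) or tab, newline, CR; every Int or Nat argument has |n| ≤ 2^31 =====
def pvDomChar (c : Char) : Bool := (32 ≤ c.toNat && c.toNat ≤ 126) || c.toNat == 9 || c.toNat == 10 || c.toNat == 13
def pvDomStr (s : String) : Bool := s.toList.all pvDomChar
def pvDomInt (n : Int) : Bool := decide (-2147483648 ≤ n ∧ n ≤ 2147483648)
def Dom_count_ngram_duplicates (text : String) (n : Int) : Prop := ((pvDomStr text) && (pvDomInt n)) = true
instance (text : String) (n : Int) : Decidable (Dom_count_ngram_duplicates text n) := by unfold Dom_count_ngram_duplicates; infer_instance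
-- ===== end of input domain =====

-- B replaces A's ngram-count dictionary and frequency sort by sorting the flat ngram list once
-- and scanning adjacent-equal pairs (alternative decomposition, similar cost; return values proved equal).

-- ===== PORT A =====
def count_ngram_duplicates (text : String) (n : Int) : Int :=
  let s := text.toList
  -- ngram_counts = {}; for i in range(len(text) - n + 1): ngram_counts[ngram] = ngram_counts.get(ngram, 0) + 1
  let ngram_counts : PySem.Dict (List Char) Int :=
    (PySem.List.pyRange 0 ((PySem.Chars.len s) - n + 1) 1).foldl
      (fun d i =>
        let ngram := PySem.Chars.slice s (some i) (some (i + n))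
        d.insert ngram (d.getD ngram 0 + 1))
      PySem.Dict.empty
  -- sorted_ngrams = sorted(ngram_counts.items(), key=lambda x: x[1], reverse=True)
  let sorted_ngrams := PySem.List.sorted ngram_counts.items (fun x => x.2) true
  -- 'if sorted_ngrams and sorted_ngrams[0]': the head is a 2-tuple, hence always truthy
  match sorted_ngrams with
  | [] => 0
  | p :: _ =>
    if n ≤ 4 then
      let ngram := p.1
      -- ngram_counts[ngram] -= 1; return ngram_counts[ngram] * len(ngram)
      -- (modify/getD is exact here: ngram is a key of the dict, so Python raises no KeyError)
      let d2 := ngram_counts.modify ngram 0 (fun c => c - 1)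
      d2.getD ngram 0 * (PySem.Chars.len ngram)
    else
      let st := sorted_ngrams.foldl
        (fun (st : PySem.Set (List Char) × PySem.Set Char) q =>
          if q.2 > 1 then (PySem.Set.add st.1 q.1, PySem.Set.update st.2 (PySem.Set.ofList q.1))
          else st)
        (PySem.Set.empty, PySem.Set.empty)
      PySem.Set.len st.2

-- ===== PORT B =====
def count_ngram_duplicates_alt (text : String) (n : Int) : Int :=
  let s := text.toList
  if n ≤ 0 ∨ n > PySem.Chars.len s then 0
  else
    -- grams = sorted(text[i:i+n] for i in range(len(text) - n + 1))
    let grams := PySem.List.sorted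
      ((PySem.List.pyRange 0 ((PySem.Chars.len s) - n + 1) 1).map
        (fun i => PySem.Chars.slice s (some i) (some (i + n))))
      (fun g => g) false
    if n ≤ 4 then
      -- best = run = 1; for a, b in zip(grams, grams[1:]): run = run+1 if a == b else 1; if run > best: best = run
      let br := (grams.zip (PySem.List.slice grams (some 1) none)).foldl
        (fun (br : Int × Int) ab =>
          let run := if ab.1 = ab.2 then br.2 + 1 else 1
          (if run > br.1 then run else br.1, run))
        (1, 1)
      (br.1 - 1) * n
    else
      -- chars = set(); for a, b in zip(grams, grams[1:]):  if a == b: chars.update(a)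
      let chars := (grams.zip (PySem.List.slice grams (some 1) none)).foldl
        (fun (cs : PySem.Set Char) ab => if ab.1 = ab.2 then PySem.Set.update cs ab.1 else cs)
        PySem.Set.empty
      PySem.Set.len chars

-- ===== PRECONDITION & SPEC =====
def Spec_count_ngram_duplicates (text : String) (n : Int) (out : Int) : Prop := out = count_ngram_duplicates_alt text n
instance (text : String) (n : Int) (out : Int) : Decidable (Spec_count_ngram_duplicates text n out) := by unfold Spec_count_ngram_duplicates; infer_instance

-- ===== CLAIM (what is proved, stated in full; the proofs are below) =====
def Claim_equal_count_ngram_duplicates : Prop := ∀ (text : String) (n : Int), Dom_count_ngram_duplicates text n → Spec_count_ngram_duplicates text n (count_ngram_duplicates text n)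

-- ===== LEMMAS AND PROOFS =====

-- the unsorted list of all slices text[i:i+n]
def pvGrams (s : List Char) (n : Int) : List (List Char) :=
  (PySem.List.pyRange 0 ((PySem.Chars.len s) - n + 1) 1).map
    (fun i => PySem.Chars.slice s (some i) (some (i + n)))

-- B's sorted ngram list, with the instances the port elaborated
def pvSorted (s : List Char) (n : Int) : List (List Char) :=
  PySem.List.sorted (pvGrams s n) (fun g => g) false

-- B's max-run scan, recursively
def pvScanBest (prev : List Char) (best run : Int) : List (List Char) → Int
  | [] => best
  | x :: xs =>
    let r := if prev = x then run + 1 else 1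
    pvScanBest x (if r > best then r else best) r xs

lemma pvSorted_eq_linear (s : List Char) (n : Int) :
    pvSorted s n =
      @PySem.List.sorted (List Char) (List Char) _ LinearOrder.toDecidableLT (pvGrams s n) (fun g => g) false := by
  unfold pvSorted
  congr 1

lemma pv_dict_eq (s : List Char) (n : Int) :
    (PySem.List.pyRange 0 ((PySem.Chars.len s) - n + 1) 1).foldl
      (fun (d : PySem.Dict (List Char) Int) i =>
        let ngram := PySem.Chars.slice s (some i) (some (i + n))
        d.insert ngram (d.getD ngram 0 + 1))
      PySem.Dict.empty = PySem.Dict.counter (pvGrams s n) := by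
  rw [← PySem.Dict.foldl_insert_getD_add_one_eq_counter]
  unfold pvGrams
  rw [List.foldl_map]

-- zip fold = recursive scan
lemma pv_fold_eq_scan (t : List (List Char)) :
    ∀ (a : List Char) (best run : Int),
      (((a :: t).zip t).foldl
        (fun (br : Int × Int) ab =>
          let r := if ab.1 = ab.2 then br.2 + 1 else 1
          (if r > br.1 then r else br.1, r))
        (best, run)).1 = pvScanBest a best run t := by
  induction t with
  | nil => intro a best run; simp [pvScanBest]
  | cons x xs ih =>
    intro a best run
    simp only [List.zip_cons_cons, List.foldl_cons]
    exact ih x _ _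

-- upper bound for the scan
lemma pv_scan_le (t : List (List Char)) :
    ∀ (a : List Char) (best run X : Int), 1 ≤ run → best ≤ X → run + (t.count a : Int) ≤ X →
      (∀ g ∈ t, (t.count g : Int) ≤ X) → pvScanBest a best run t ≤ X := by
  induction t with
  | nil => intro a best run X h1 h2 h3 h4; simpa [pvScanBest] using h2
  | cons x xs ih =>
    intro a best run X h1 h2 h3 h4
    by_cases hxa : a = x
    · subst hxa
      simp only [pvScanBest]
      apply ih a _ _ X (by omega)
      · -- max best (run+1) ≤ X
        have : run + 1 + (xs.count a : Int) ≤ X := by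
          rw [List.count_cons_self] at h3; push_cast at h3; omega
        split_ifs <;> omega
      · rw [List.count_cons_self] at h3; push_cast at h3; omega
      · intro g hg
        calc ((xs.count g : Nat) : Int) ≤ ((a :: xs).count g : Int) := by
              simp [List.count_cons]; split_ifs <;> omega
          _ ≤ X := h4 g (List.mem_cons_of_mem _ hg)
    · simp only [pvScanBest, if_neg hxa]
      apply ih x _ _ X (by omega)
      · split_ifs <;> omega
      · have := h4 x (List.mem_cons_self)
        rw [List.count_cons_self] at this; push_cast at this; omega
      · intro g hg
        calc ((xs.count g : Nat) : Int) ≤ ((x :: xs).count g : Int) := by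
              simp [List.count_cons]; split_ifs <;> omega
          _ ≤ X := h4 g (List.mem_cons_of_mem _ hg)

-- lower bounds for the scan on a sorted list
lemma pv_le_scan (t : List (List Char)) :
    ∀ (a : List Char) (best run : Int), (a :: t).Pairwise (· ≤ ·) → run ≤ best →
      best ≤ pvScanBest a best run t ∧
      run + (t.count a : Int) ≤ pvScanBest a best run t ∧
      ∀ g ∈ t, g ≠ a → (t.count g : Int) ≤ pvScanBest a best run t := by
  induction t with
  | nil => intro a best run _ hrb; simp [pvScanBest]; omega
  | cons x xs ih =>
    intro a best run hp hrb
    have hp' : (x :: xs).Pairwise (· ≤ ·) := hp.of_cons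
    have hax : a ≤ x := (List.pairwise_cons.1 hp).1 x List.mem_cons_self
    by_cases hxa : a = x
    · subst hxa
      have hunf : pvScanBest a best run (a :: xs)
          = pvScanBest a (if run + 1 > best then run + 1 else best) (run + 1) xs := by
        simp [pvScanBest]
      rw [hunf]
      have hIH := ih a (if run + 1 > best then run + 1 else best) (run + 1) hp' (by split_ifs <;> omega)
      refine ⟨by have := hIH.1; split_ifs at this ⊢ <;> omega, ?_, ?_⟩
      · have := hIH.2.1
        rw [List.count_cons_self]; push_cast; omega
      · intro g hg hga
        rcases List.mem_cons.1 hg with hg1 | hg2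
        · exact absurd hg1 hga
        · have := hIH.2.2 g hg2 hga
          have hc : List.count g (a :: xs) = List.count g xs := by
            simp [Ne.symm hga]
          rw [hc]; omega
    · have hunf : pvScanBest a best run (x :: xs)
          = pvScanBest x (if 1 > best then 1 else best) 1 xs := by
        simp [pvScanBest, hxa]
      rw [hunf]
      have hIH := ih x (if 1 > best then 1 else best) 1 hp' (by split_ifs <;> omega)
      have hb1 : best ≤ (if 1 > best then 1 else best) := by split_ifs <;> omega
      have hbest : best ≤ pvScanBest x (if 1 > best then 1 else best) 1 xs := le_trans hb1 hIH.1
      have haxlt : a < x := lt_of_le_of_ne hax hxa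
      have hxs : ∀ g ∈ xs, x ≤ g := (List.pairwise_cons.1 hp').1
      have hnota : (x :: xs).count a = 0 := by
        rw [List.count_eq_zero]
        intro hmem
        rcases List.mem_cons.1 hmem with h1 | h2
        · exact absurd h1.symm (ne_of_gt haxlt)
        · exact absurd rfl (ne_of_gt (lt_of_lt_of_le haxlt (hxs a h2)))
      refine ⟨hbest, ?_, ?_⟩
      · rw [hnota]; push_cast; omega
      · intro g hg hga
        by_cases hgx : g = x
        · subst hgx
          have := hIH.2.1
          rw [List.count_cons_self]; push_cast; omega
        · rcases List.mem_cons.1 hg with h1 | h2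
          · exact absurd h1 hgx
          · have := hIH.2.2 g h2 hgx
            have hc : List.count g (x :: xs) = List.count g xs := by
              simp [Ne.symm hgx]
            rw [hc]; omega

-- on a sorted list, an adjacent equal pair at g is exactly a duplicated g
lemma pv_pair_mem_zip_iff (l : List (List Char)) (h : l.Pairwise (· ≤ ·)) (g : List Char) :
    (∃ ab ∈ l.zip l.tail, ab.1 = ab.2 ∧ ab.1 = g) ↔ 1 < l.count g := by
  induction l with
  | nil => simp
  | cons a t ih =>
    have ht : t.Pairwise (· ≤ ·) := h.of_cons
    cases t with
    | nil => simp [List.count_cons]; split_ifs <;> omega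
    | cons b t' =>
      have hzip : (a :: b :: t').zip (a :: b :: t').tail
          = (a, b) :: ((b :: t').zip (b :: t').tail) := by simp
      rw [hzip]
      constructor
      · rintro ⟨ab, hab, he, hg⟩
        rcases List.mem_cons.1 hab with h1 | h2
        · -- ab = (a,b), a = b = g
          subst h1
          simp only at he hg
          subst hg
          rw [← he]
          simp
        · have := (ih ht).1 ⟨ab, h2, he, hg⟩
          rw [List.count_cons]
          omega
      · intro hc
        by_cases hag : a = g
        · subst hag
          -- count a (a::b::t') ≥ 2 → a ∈ b::t'; if b = a done else contradiction with sorted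
          rw [List.count_cons_self] at hc
          have hmem : a ∈ b :: t' := by
            rw [← List.count_pos_iff]; omega
          by_cases hba : b = a
          · exact ⟨(a, b), List.mem_cons_self, by simp [hba], rfl⟩
          · exfalso
            have hab : a ≤ b := (List.pairwise_cons.1 h).1 b List.mem_cons_self
            have hbt : ∀ y ∈ t', b ≤ y := (List.pairwise_cons.1 ht).1
            rcases List.mem_cons.1 hmem with h1 | h2
            · exact hba h1.symm
            · have : b ≤ a := le_trans (hbt a h2) le_rfl
              exact hba (le_antisymm this hab)
        · have hc' : 1 < (b :: t').count g := by
            have hcc : (a :: b :: t').count g = (b :: t').count g := by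
              simp [hag]
            omega
          rcases (ih ht).2 hc' with ⟨ab, hab, he, hg⟩
          exact ⟨ab, List.mem_cons_of_mem _ hab, he, hg⟩

-- the characters accumulated by B's n>4 fold
lemma pv_memB (l : List (List Char × List Char)) (init : PySem.Set Char) (c : Char) :
    c ∈ (l.foldl (fun (cs : PySem.Set Char) ab => if ab.1 = ab.2 then PySem.Set.update cs ab.1 else cs) init) ↔
      c ∈ init ∨ ∃ ab ∈ l, ab.1 = ab.2 ∧ c ∈ ab.1 := by
  induction l generalizing init with
  | nil => simp
  | cons q l' ih =>
    simp only [List.foldl_cons]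
    rw [ih]
    by_cases hq : q.1 = q.2
    · rw [if_pos hq, PySem.Set.mem_update]
      constructor
      · rintro (⟨h | h⟩ | h)
        · exact Or.inl h
        · exact Or.inr ⟨q, List.mem_cons_self, hq, h⟩
        · rcases h with ⟨ab, hab, h1, h2⟩
          exact Or.inr ⟨ab, List.mem_cons_of_mem _ hab, h1, h2⟩
      · rintro (h | ⟨ab, hab, h1, h2⟩)
        · exact Or.inl (Or.inl h)
        · rcases List.mem_cons.1 hab with h3 | h3
          · subst h3; exact Or.inl (Or.inr h2)
          · exact Or.inr ⟨ab, h3, h1, h2⟩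
    · rw [if_neg hq]
      constructor
      · rintro (h | h)
        · exact Or.inl h
        · rcases h with ⟨ab, hab, h1, h2⟩
          exact Or.inr ⟨ab, List.mem_cons_of_mem _ hab, h1, h2⟩
      · rintro (h | ⟨ab, hab, h1, h2⟩)
        · exact Or.inl h
        · rcases List.mem_cons.1 hab with h3 | h3
          · subst h3; exact absurd h1 hq
          · exact Or.inr ⟨ab, h3, h1, h2⟩

lemma pv_nodupB (l : List (List Char × List Char)) (init : PySem.Set Char) (h : init.Nodup) :
    (l.foldl (fun (cs : PySem.Set Char) ab => if ab.1 = ab.2 then PySem.Set.update cs ab.1 else cs) init).Nodup := by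
  induction l generalizing init with
  | nil => exact h
  | cons q l' ih =>
    simp only [List.foldl_cons]
    apply ih
    split_ifs
    · exact PySem.Set.nodup_update _ _ h
    · exact h

-- the characters accumulated by A's n>4 fold (second component)
lemma pv_memA (l : List (List Char × Int)) (st : PySem.Set (List Char) × PySem.Set Char) (c : Char) :
    c ∈ (l.foldl
        (fun (st : PySem.Set (List Char) × PySem.Set Char) q =>
          if q.2 > 1 then (PySem.Set.add st.1 q.1, PySem.Set.update st.2 (PySem.Set.ofList q.1))
          else st) st).2 ↔
      c ∈ st.2 ∨ ∃ q ∈ l, 1 < q.2 ∧ c ∈ q.1 := by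
  induction l generalizing st with
  | nil => simp
  | cons q l' ih =>
    simp only [List.foldl_cons]
    rw [ih]
    by_cases hq : q.2 > 1
    · rw [if_pos hq]
      simp only [PySem.Set.mem_update, PySem.Set.mem_ofList]
      constructor
      · rintro (⟨h | h⟩ | h)
        · exact Or.inl h
        · exact Or.inr ⟨q, List.mem_cons_self, hq, h⟩
        · rcases h with ⟨p, hp, h1, h2⟩
          exact Or.inr ⟨p, List.mem_cons_of_mem _ hp, h1, h2⟩
      · rintro (h | ⟨p, hp, h1, h2⟩)
        · exact Or.inl (Or.inl h)
        · rcases List.mem_cons.1 hp with h3 | h3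
          · subst h3; exact Or.inl (Or.inr h2)
          · exact Or.inr ⟨p, h3, h1, h2⟩
    · rw [if_neg hq]
      constructor
      · rintro (h | h)
        · exact Or.inl h
        · rcases h with ⟨p, hp, h1, h2⟩
          exact Or.inr ⟨p, List.mem_cons_of_mem _ hp, h1, h2⟩
      · rintro (h | ⟨p, hp, h1, h2⟩)
        · exact Or.inl h
        · rcases List.mem_cons.1 hp with h3 | h3
          · subst h3; exact absurd h1 hq
          · exact Or.inr ⟨p, h3, h1, h2⟩

lemma pv_nodupA (l : List (List Char × Int)) (st : PySem.Set (List Char) × PySem.Set Char) (h : st.2.Nodup) :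
    (l.foldl
        (fun (st : PySem.Set (List Char) × PySem.Set Char) q =>
          if q.2 > 1 then (PySem.Set.add st.1 q.1, PySem.Set.update st.2 (PySem.Set.ofList q.1))
          else st) st).2.Nodup := by
  induction l generalizing st with
  | nil => exact h
  | cons q l' ih =>
    simp only [List.foldl_cons]
    apply ih
    split_ifs
    · exact PySem.Set.nodup_update _ _ h
    · exact h

-- every slice in pvGrams for 1 ≤ n ≤ len has length n
lemma pv_len_mem_grams (s : List Char) (n : Int) (h1 : 1 ≤ n) (h2 : n ≤ (s.length : Int))
    (g : List Char) (hg : g ∈ pvGrams s n) : (g.length : Int) = n := by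
  unfold pvGrams at hg
  rcases List.mem_map.1 hg with ⟨i, hi, rfl⟩
  rw [PySem.List.mem_pyRange_one] at hi
  rw [PySem.Chars.len_eq] at hi
  have h0i : 0 ≤ i := hi.1
  have hin : i + n ≤ (s.length : Int) := by omega
  rw [PySem.Chars.slice_eq_listSlice, PySem.List.slice_toNat _ h0i (by omega)]
  rw [List.length_take, List.length_drop]
  omega

lemma pv_slice_nil_of_nonpos (s : List Char) (n i : Int) (hn : n ≤ 0) (h0 : 0 ≤ i) (h1 : 0 ≤ i + n) :
    PySem.Chars.slice s (some i) (some (i + n)) = [] := by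
  rw [PySem.Chars.slice_eq_listSlice, PySem.List.slice_toNat _ h0 h1]
  have : (i + n).toNat - i.toNat = 0 := by omega
  rw [this, List.take_zero]

-- len + n ≤ 0, i ≥ 0: the slice is empty

lemma pv_slice_nil_of_short (s : List Char) (n i : Int) (hln : (s.length : Int) + n ≤ 0) (h0 : 0 ≤ i) :
    PySem.Chars.slice s (some i) (some (i + n)) = [] := by
  by_cases h1 : 0 ≤ i + n
  · exact pv_slice_nil_of_nonpos s n i (by omega) h0 h1
  · rw [PySem.Chars.slice_eq_listSlice]
    apply List.eq_nil_of_length_eq_zero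
    rw [PySem.List.length_slice]
    have ha : PySem.List.clampIdx s.length i = min i.toNat s.length := by
      unfold PySem.List.clampIdx; split_ifs <;> omega
    have hb : PySem.List.clampIdx s.length (i + n) ≤ (s.length + (i + n)).toNat := by
      unfold PySem.List.clampIdx; split_ifs <;> omega
    omega

-- for n ≤ 0, the head of A's frequency-sorted list is the empty ngram
lemma pv_head_nil_of_nonpos (s : List Char) (n : Int) (hn : n ≤ 0)
    (p : List Char × Int) (t : List (List Char × Int))
    (h : PySem.List.sorted (PySem.Dict.counter (pvGrams s n)).items (fun x => x.2) true = p :: t) :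
    p.1 = [] := by
  have hpmem : p ∈ (PySem.Dict.counter (pvGrams s n)).items := by
    have : p ∈ PySem.List.sorted (PySem.Dict.counter (pvGrams s n)).items (fun x => x.2) true := by
      rw [h]; exact List.mem_cons_self
    exact (PySem.List.mem_sorted _ _ _ _).1 this
  rw [PySem.Dict.items_counter] at hpmem
  rcases List.mem_map.1 hpmem with ⟨g0, hg0, hp⟩
  have hg0G : g0 ∈ pvGrams s n := (PySem.Set.mem_ofList _ _).1 hg0
  have hmax : ∀ y ∈ (PySem.Dict.counter (pvGrams s n)).items, y.2 ≤ p.2 :=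
    PySem.List.key_head_sorted_rev_ge _ _ h
  by_contra hne
  -- p = (g0, count g0 G) with g0 ≠ []
  have hp1 : p.1 = g0 := by rw [← hp]
  have hp2 : p.2 = ((pvGrams s n).count g0 : Int) := by rw [← hp]
  have hg0ne : g0 ≠ [] := by rw [hp1] at hne; exact hne
  -- split the ngram range at -n
  have hlen0 : (0:Int) ≤ PySem.Chars.len s := by rw [PySem.Chars.len_eq]; positivity
  by_cases hshort : (s.length : Int) + n ≤ 0
  · -- every slice is empty, contradicting g0 ∈ G with g0 ≠ []
    rcases List.mem_map.1 hg0G with ⟨i, hi, hgi⟩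
    rw [PySem.List.mem_pyRange_one] at hi
    exact hg0ne (hgi ▸ pv_slice_nil_of_short s n i hshort hi.1)
  · have hsplit : PySem.List.pyRange 0 ((PySem.Chars.len s) - n + 1) 1
        = PySem.List.pyRange 0 (-n) 1 ++ PySem.List.pyRange (-n) ((PySem.Chars.len s) - n + 1) 1 := by
      apply PySem.List.pyRange_one_append 0 (-n) _ (by omega) (by rw [PySem.Chars.len_eq]; omega)
    have hG : pvGrams s n
        = (PySem.List.pyRange 0 (-n) 1).map (fun i => PySem.Chars.slice s (some i) (some (i + n)))
          ++ (PySem.List.pyRange (-n) ((PySem.Chars.len s) - n + 1) 1).map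
              (fun i => PySem.Chars.slice s (some i) (some (i + n))) := by
      unfold pvGrams; rw [hsplit, List.map_append]
    -- the second block consists of empty slices only
    have hm2 : ∀ g ∈ (PySem.List.pyRange (-n) ((PySem.Chars.len s) - n + 1) 1).map
        (fun i => PySem.Chars.slice s (some i) (some (i + n))), g = [] := by
      intro g hg
      rcases List.mem_map.1 hg with ⟨i, hi, hgi⟩
      rw [PySem.List.mem_pyRange_one] at hi
      exact hgi ▸ pv_slice_nil_of_nonpos s n i hn (by omega) (by omega)
    -- count of [] is at least len+1
    have hlen2 : ((PySem.List.pyRange (-n) ((PySem.Chars.len s) - n + 1) 1).map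
        (fun i => PySem.Chars.slice s (some i) (some (i + n)))).length = (s.length + 1 : Nat) := by
      rw [List.length_map, PySem.List.length_pyRange_one, PySem.Chars.len_eq]
      omega
    have hcnil : (s.length + 1 : Nat) ≤ (pvGrams s n).count ([] : List Char) := by
      rw [hG, List.count_append]
      have : ((PySem.List.pyRange (-n) ((PySem.Chars.len s) - n + 1) 1).map
          (fun i => PySem.Chars.slice s (some i) (some (i + n)))).count ([] : List Char)
          = (s.length + 1 : Nat) := by
        rw [← hlen2]
        rw [List.count_eq_length]
        intro b hb
        rw [hm2 b hb]
      omega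
    -- count of g0 is at most (-n).toNat ≤ len
    have hcg0 : (pvGrams s n).count g0 ≤ (-n).toNat := by
      rw [hG, List.count_append]
      have h2 : ((PySem.List.pyRange (-n) ((PySem.Chars.len s) - n + 1) 1).map
          (fun i => PySem.Chars.slice s (some i) (some (i + n)))).count g0 = 0 := by
        rw [List.count_eq_zero]
        intro hmem
        exact hg0ne (hm2 _ hmem)
      have h1 : ((PySem.List.pyRange 0 (-n) 1).map
          (fun i => PySem.Chars.slice s (some i) (some (i + n)))).count g0
          ≤ (-n).toNat := by
        calc _ ≤ ((PySem.List.pyRange 0 (-n) 1).map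
            (fun i => PySem.Chars.slice s (some i) (some (i + n)))).length := List.count_le_length
          _ = (-n).toNat := by
            rw [List.length_map, PySem.List.length_pyRange_one]
            omega
      omega
    -- [] is in G, so its count bounds p.2 from below
    have hnilG : ([] : List Char) ∈ pvGrams s n := by
      rw [hG]
      apply List.mem_append_right
      apply List.mem_map.2
      refine ⟨-n, ?_, ?_⟩
      · rw [PySem.List.mem_pyRange_one, PySem.Chars.len_eq]; omega
      · exact pv_slice_nil_of_nonpos s n (-n) hn (by omega) (by omega)
    have hnilitems : (([] : List Char), ((pvGrams s n).count ([] : List Char) : Int))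
        ∈ (PySem.Dict.counter (pvGrams s n)).items := by
      rw [PySem.Dict.items_counter]
      exact List.mem_map.2 ⟨[], (PySem.Set.mem_ofList _ _).2 hnilG, rfl⟩
    have := hmax _ hnilitems
    rw [hp2] at this
    simp only at this
    -- count [] ≤ count g0 ≤ (-n).toNat < len + 1 ≤ count []
    have hle : (-n).toNat < s.length + 1 := by omega
    omega


lemma pv_caseNeg (text : String) (n : Int) (hn : n ≤ 0) :
    count_ngram_duplicates text n = count_ngram_duplicates_alt text n := by
  have hB : count_ngram_duplicates_alt text n = 0 := by
    simp only [count_ngram_duplicates_alt]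
    rw [if_pos (Or.inl hn)]
  rw [hB]
  simp only [count_ngram_duplicates]
  rw [pv_dict_eq]
  rcases hsort : PySem.List.sorted (PySem.Dict.counter (pvGrams text.toList n)).items (fun x => x.2) true with _ | ⟨p, t⟩
  · rfl
  · have hp1 : p.1 = [] := pv_head_nil_of_nonpos text.toList n hn p t hsort
    dsimp only
    rw [if_pos (by omega : n ≤ 4), hp1]
    simp [PySem.Chars.len]

lemma pv_caseBig (text : String) (n : Int) (hbig : PySem.Chars.len text.toList < n) :
    count_ngram_duplicates text n = count_ngram_duplicates_alt text n := by
  have hB : count_ngram_duplicates_alt text n = 0 := by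
    simp only [count_ngram_duplicates_alt]
    rw [if_pos (Or.inr hbig)]
  rw [hB]
  simp only [count_ngram_duplicates]
  rw [pv_dict_eq]
  have hG : pvGrams text.toList n = [] := by
    unfold pvGrams
    rw [PySem.List.pyRange_one_eq_nil (by omega)]
    rfl
  rw [hG]
  rfl

lemma pv_main (text : String) (n : Int) (hn : 1 ≤ n) (hle : n ≤ PySem.Chars.len text.toList) :
    count_ngram_duplicates text n = count_ngram_duplicates_alt text n := by
  have hlen : PySem.Chars.len text.toList = (text.toList.length : Int) := PySem.Chars.len_eq _
  rw [hlen] at hle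
  -- the ngram list is nonempty
  have hGne : pvGrams text.toList n ≠ [] := by
    unfold pvGrams
    intro h
    apply_fun List.length at h
    rw [List.length_map, PySem.List.length_pyRange_one, hlen] at h
    simp only [List.length_nil] at h
    omega
  -- A's frequency-sorted item list is nonempty
  obtain ⟨p, t, hsort⟩ : ∃ p t,
      PySem.List.sorted (PySem.Dict.counter (pvGrams text.toList n)).items (fun x => x.2) true = p :: t := by
    rcases hcase : PySem.List.sorted (PySem.Dict.counter (pvGrams text.toList n)).items (fun x => x.2) true with _ | ⟨p, t⟩
    · exfalso
      rw [PySem.List.sorted_eq_nil_iff, PySem.Dict.items_counter] at hcase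
      rcases List.exists_mem_of_ne_nil _ hGne with ⟨g, hg⟩
      have : (g, ((pvGrams text.toList n).count g : Int)) ∈
          ((PySem.Set.ofList (pvGrams text.toList n)).map (fun k => (k, ((pvGrams text.toList n).count k : Int)))) :=
        List.mem_map.2 ⟨g, (PySem.Set.mem_ofList _ _).2 hg, rfl⟩
      rw [hcase] at this
      exact List.not_mem_nil this
    · exact ⟨p, t, rfl⟩
  -- head facts: p = (g0, count of g0), of maximal count
  have hpmem : p ∈ (PySem.Dict.counter (pvGrams text.toList n)).items := by
    have : p ∈ PySem.List.sorted (PySem.Dict.counter (pvGrams text.toList n)).items (fun x => x.2) true := by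
      rw [hsort]; exact List.mem_cons_self
    exact (PySem.List.mem_sorted _ _ _ _).1 this
  have hpmem' := hpmem
  rw [PySem.Dict.items_counter] at hpmem'
  rcases List.mem_map.1 hpmem' with ⟨g0, hg0set, hp⟩
  have hg0G : g0 ∈ pvGrams text.toList n := (PySem.Set.mem_ofList _ _).1 hg0set
  have hp1 : p.1 = g0 := by rw [← hp]
  have hp2 : p.2 = ((pvGrams text.toList n).count g0 : Int) := by rw [← hp]
  have hmax : ∀ g ∈ pvGrams text.toList n, ((pvGrams text.toList n).count g : Int) ≤ p.2 := by
    intro g hg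
    have hin : (g, ((pvGrams text.toList n).count g : Int)) ∈ (PySem.Dict.counter (pvGrams text.toList n)).items := by
      rw [PySem.Dict.items_counter]
      exact List.mem_map.2 ⟨g, (PySem.Set.mem_ofList _ _).2 hg, rfl⟩
    exact PySem.List.key_head_sorted_rev_ge _ _ hsort _ hin
  -- B's sorted gram list
  have hperm : (pvSorted text.toList n).Perm (pvGrams text.toList n) := by
    unfold pvSorted
    exact PySem.List.sorted_perm _ _ _
  have hpair : (pvSorted text.toList n).Pairwise (· ≤ ·) := by
    rw [pvSorted_eq_linear]
    exact PySem.List.sorted_pairwise _ _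
  obtain ⟨a, t', hLat⟩ : ∃ a t', pvSorted text.toList n = a :: t' := by
    rcases hL : pvSorted text.toList n with _ | ⟨a, t'⟩
    · exfalso
      rw [hL] at hperm
      exact hGne hperm.nil_eq.symm
    · exact ⟨a, t', rfl⟩
  have hcnt : ∀ g, (pvSorted text.toList n).count g = (pvGrams text.toList n).count g :=
    fun g => hperm.count_eq g
  have hmemL : ∀ g, g ∈ pvSorted text.toList n ↔ g ∈ pvGrams text.toList n := fun g => hperm.mem_iff
  -- unfold both ports
  simp only [count_ngram_duplicates, count_ngram_duplicates_alt]
  rw [pv_dict_eq, hsort]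
  have hBnot : ¬(n ≤ 0 ∨ PySem.Chars.len text.toList < n) := by
    push Not
    exact ⟨by omega, by rw [hlen]; omega⟩
  rw [if_neg hBnot]
  have hgrams : PySem.List.sorted
      ((PySem.List.pyRange 0 ((PySem.Chars.len text.toList) - n + 1) 1).map
        (fun i => PySem.Chars.slice text.toList (some i) (some (i + n))))
      (fun g => g) false = pvSorted text.toList n := rfl
  rw [hgrams, PySem.List.slice_from_one, hLat]
  dsimp only
  by_cases h4 : n ≤ 4
  · rw [if_pos h4, if_pos h4]
    rw [PySem.Dict.getD_modify_self, PySem.Dict.getD_counter]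
    rw [List.tail_cons, pv_fold_eq_scan t' a 1 1]
    -- length of the head ngram is n
    have hlg0 : PySem.Chars.len p.1 = n := by
      rw [hp1, PySem.Chars.len_eq]
      exact pv_len_mem_grams text.toList n hn hle g0 hg0G
    -- the scan equals the maximal count
    have hpairat : (a :: t').Pairwise (· ≤ ·) := hLat ▸ hpair
    have hLB := pv_le_scan t' a 1 1 hpairat le_rfl
    have hUB : pvScanBest a 1 1 t' ≤ ((pvGrams text.toList n).count p.1 : Int) := by
      apply pv_scan_le t' a 1 1 _ le_rfl
      · have : 0 < (pvGrams text.toList n).count p.1 := by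
          rw [hp1, List.count_pos_iff]; exact hg0G
        omega
      · have haG : a ∈ pvGrams text.toList n := (hmemL a).1 (by rw [hLat]; exact List.mem_cons_self)
        have h1 : (pvGrams text.toList n).count a = (a :: t').count a := by rw [← hcnt a, hLat]
        have h2 := hmax a haG
        rw [hp2, ← hp1] at h2
        rw [List.count_cons_self] at h1
        push_cast [h1] at h2 ⊢
        omega
      · intro g hg
        have hgL : g ∈ pvSorted text.toList n := by rw [hLat]; exact List.mem_cons_of_mem _ hg
        have hgG : g ∈ pvGrams text.toList n := (hmemL g).1 hgL
        have h2 := hmax g hgG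
        rw [hp2, ← hp1] at h2
        have h1 : g ∈ t' → (t'.count g : Int) ≤ ((pvGrams text.toList n).count g : Int) := by
          intro _
          rw [← hcnt g, hLat]
          have : t'.count g ≤ (a :: t').count g := by
            rw [List.count_cons]; omega
          exact_mod_cast this
        exact le_trans (h1 hg) h2
    have hLB' : ((pvGrams text.toList n).count p.1 : Int) ≤ pvScanBest a 1 1 t' := by
      by_cases hpa : p.1 = a
      · rw [hpa, ← hcnt a, hLat, List.count_cons_self]
        have := hLB.2.1
        push_cast
        omega
      · have hpL : p.1 ∈ pvSorted text.toList n := (hmemL p.1).2 (hp1 ▸ hg0G)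
        rw [hLat] at hpL
        rcases List.mem_cons.1 hpL with h1 | h1
        · exact absurd h1 hpa
        · have := hLB.2.2 p.1 h1 hpa
          rw [← hcnt p.1, hLat]
          have hc : (a :: t').count p.1 = t'.count p.1 := by
            simp [Ne.symm hpa]
          rw [hc]
          exact this
    have hfin : pvScanBest a 1 1 t' = (((pvGrams text.toList n).count p.1 : Nat) : Int) :=
      le_antisymm hUB hLB'
    rw [hfin, hlg0]
  · rw [if_neg h4, if_neg h4]
    rw [List.tail_cons]
    -- both sides are lengths of duplicate-character sets with the same members
    have hA2 := pv_nodupA (p :: t) (PySem.Set.empty, PySem.Set.empty) List.nodup_nil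
    have hB2 := pv_nodupB ((a :: t').zip t') PySem.Set.empty List.nodup_nil
    have hmemiff : ∀ c : Char,
        (c ∈ ((p :: t).foldl
          (fun (st : PySem.Set (List Char) × PySem.Set Char) q =>
            if q.2 > 1 then (PySem.Set.add st.1 q.1, PySem.Set.update st.2 (PySem.Set.ofList q.1))
            else st) (PySem.Set.empty, PySem.Set.empty)).2) ↔
        (c ∈ ((a :: t').zip t').foldl
          (fun (cs : PySem.Set Char) ab => if ab.1 = ab.2 then PySem.Set.update cs ab.1 else cs)
          PySem.Set.empty) := by
      intro c
      rw [pv_memA, pv_memB]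
      have hAside : (∃ q ∈ p :: t, 1 < q.2 ∧ c ∈ q.1) ↔
          ∃ g ∈ pvGrams text.toList n, 1 < (pvGrams text.toList n).count g ∧ c ∈ g := by
        constructor
        · rintro ⟨q, hq, h1, h2⟩
          have : q ∈ (PySem.Dict.counter (pvGrams text.toList n)).items := by
            rw [← hsort] at hq
            exact (PySem.List.mem_sorted _ _ _ _).1 hq
          rw [PySem.Dict.items_counter] at this
          rcases List.mem_map.1 this with ⟨g, hgset, hgq⟩
          refine ⟨g, (PySem.Set.mem_ofList _ _).1 hgset, ?_, ?_⟩
          · have : q.2 = ((pvGrams text.toList n).count g : Int) := by rw [← hgq]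
            rw [this] at h1
            exact_mod_cast h1
          · have : q.1 = g := by rw [← hgq]
            rwa [this] at h2
        · rintro ⟨g, hg, h1, h2⟩
          refine ⟨(g, ((pvGrams text.toList n).count g : Int)), ?_, by simp; exact_mod_cast h1, h2⟩
          rw [← hsort]
          apply (PySem.List.mem_sorted _ _ _ _).2
          rw [PySem.Dict.items_counter]
          exact List.mem_map.2 ⟨g, (PySem.Set.mem_ofList _ _).2 hg, rfl⟩
      have hBside : (∃ ab ∈ (a :: t').zip t', ab.1 = ab.2 ∧ c ∈ ab.1) ↔
          ∃ g ∈ pvGrams text.toList n, 1 < (pvGrams text.toList n).count g ∧ c ∈ g := by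
        have hzip : (a :: t').zip t' = (pvSorted text.toList n).zip (pvSorted text.toList n).tail := by
          rw [hLat, List.tail_cons]
        rw [hzip]
        constructor
        · rintro ⟨ab, hab, he, hc⟩
          have hdup : 1 < (pvSorted text.toList n).count ab.1 :=
            (pv_pair_mem_zip_iff _ hpair ab.1).1 ⟨ab, hab, he, rfl⟩
          rw [hcnt] at hdup
          have habG : ab.1 ∈ pvGrams text.toList n := by
            rw [← List.count_pos_iff]; omega
          exact ⟨ab.1, habG, hdup, hc⟩
        · rintro ⟨g, hg, h1, h2⟩
          have hdup : 1 < (pvSorted text.toList n).count g := by rw [hcnt]; exact h1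
          rcases (pv_pair_mem_zip_iff _ hpair g).2 hdup with ⟨ab, hab, he, hg'⟩
          exact ⟨ab, hab, he, hg' ▸ h2⟩
      rw [hAside, hBside]
    have hpermAB := (List.perm_ext_iff_of_nodup hA2 hB2).2 (by
      intro c
      exact hmemiff c)
    simp only [PySem.Set.len]
    rw [hpermAB.length_eq]

-- ===== VERDICT (by name: the statement is the Claim_ definition above) =====
theorem count_ngram_duplicates_spec : Claim_equal_count_ngram_duplicates := by
  intro text n _
  unfold Spec_count_ngram_duplicates
  by_cases hn : n ≤ 0
  · exact pv_caseNeg text n hn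
  · by_cases hbig : PySem.Chars.len text.toList < n
    · exact pv_caseBig text n hbig
    · exact pv_main text n (by omega) (by omega)
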